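-- pv_equiv track=rewrite | github.com/MengkeSong/Saliency-Ranking-Paradigm | util/propsal_labels_delete.py | paixu
-- ===== SOURCE A (Python) =====
-- def paixu(train_labels):
--     train_label = []
--     lens = len(train_labels)
--     for i in range(0, len(train_labels), lens):
--         pros = train_labels[i: i + lens]
--         aa=pros
--         bb = [(aa[i - 1], i) for i in range(1, len(aa) + 1)]
--         cc = sorted(bb)
--         dd = [(cc[i - 1][0], i, cc[i - 1][1]) for i in range(1, lens+1)]
--         ee = sorted(dd, key=lambda x: x[2])
--         ff = [x[1] for x in ee]
--         ff_copy=[(x-1) for x in ff]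
--
--
--         ff_copy_copy = ff_copy.copy()
--
--         if lens == 1:
--             for t in range(len(ff_copy)):
--                 ff_copy_copy[t]+=5
--         if lens == 2:
--             for t in range(len(ff_copy)):
--                 ff_copy_copy[t]+=4
--         if lens == 3:
--             for t in range(len(ff_copy)):
--                 ff_copy_copy[t]+=3
--         if lens == 4:
--             for t in range(len(ff_copy)):
--                 ff_copy_copy[t]+=2
--         if lens == 5:
--             for t in range(len(ff_copy)):
--                 ff_copy_copy[t]+=1
--
--     return ff_copy_copy
-- ===== SOURCE B (Python) =====
-- def paixu(train_labels):
--     # Comparison-counting ranks: no sorting at all. The rank of element i is the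
--     # number of elements j with (value_j, j) < (value_i, i); the length offset
--     # 6 - n (for n <= 5) is added directly.
--     n = len(train_labels)
--     off = 6 - n if n <= 5 else 0
--     out = []
--     for i, v in enumerate(train_labels):
--         r = 0
--         for j, w in enumerate(train_labels):
--             if w < v or (w == v and j < i):
--                 r += 1
--         out.append(r + off)
--     return out
-- ===== Notes on version B (the rewrite author's own statement) =====
-- stated objective: alternative
-- what changed: B replaces A's decorate/sort/sort-again/re-pair pipeline by sort-free comparison counting: each element's rank is the count of elements with a strictly smaller (value, index) pair, computed by a nested counting loop, with the length offset added in the same pass.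
import Mathlib
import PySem

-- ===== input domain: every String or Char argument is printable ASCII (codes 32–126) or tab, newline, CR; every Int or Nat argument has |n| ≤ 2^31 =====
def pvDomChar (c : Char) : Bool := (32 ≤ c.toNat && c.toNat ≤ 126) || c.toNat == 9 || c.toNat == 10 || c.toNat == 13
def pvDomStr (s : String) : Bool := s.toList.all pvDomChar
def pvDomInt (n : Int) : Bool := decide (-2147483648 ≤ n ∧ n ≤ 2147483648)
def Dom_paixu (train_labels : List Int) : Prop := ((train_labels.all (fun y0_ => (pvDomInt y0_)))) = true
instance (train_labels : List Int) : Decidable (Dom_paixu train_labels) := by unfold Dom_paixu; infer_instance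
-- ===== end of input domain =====

-- B replaces A's decorate/sort/sort-again/re-pair pipeline by sort-free comparison
-- counting (each rank = number of strictly smaller (value, index) pairs, nested loop);
-- Pre_ excludes the empty list, where A raises ValueError.

-- ===== PORT A =====
def paixu (train_labels : List Int) : List Int :=
  let lens : Int := PySem.List.len train_labels
  -- range(0, len(train_labels), lens): ValueError (step 0) exactly when train_labels = [],
  -- excluded by Pre_paixu; otherwise the loop runs exactly once (i = 0).
  -- The initial accumulator [] stands for the undefined ff_copy_copy before the loop;
  -- under Pre_paixu the loop body always overwrites it.
  (PySem.List.pyRange 0 (PySem.List.len train_labels) lens).foldl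
    (fun _acc i =>
      let pros := PySem.List.slice train_labels (some i) (some (i + lens))
      let aa := pros
      -- aa[i-1] for i in range(1, len(aa)+1): the index is always in range, so the
      -- pyGetD default 0 is never used.
      let bb := (PySem.List.pyRange 1 (PySem.List.len aa + 1)).map
        (fun j => (PySem.List.pyGetD aa (j - 1) 0, j))
      -- sorted(bb): Python tuple (lexicographic) comparison
      let cc := PySem.List.sorted2 bb (fun p => p.1) (fun p => p.2)
      let dd := (PySem.List.pyRange 1 (lens + 1)).map
        (fun j =>
          let c := PySem.List.pyGetD cc (j - 1) (0, 0)
          (c.1, j, c.2))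
      let ee := PySem.List.sorted dd (fun x => x.2.2)
      let ff := ee.map (fun x => x.2.1)
      let ffCopy := ff.map (fun x => x - 1)
      -- each 'if lens == k: for t in range(len): l[t] += 6-k' is the elementwise map + (6-k)
      let f1 := if lens = 1 then ffCopy.map (fun x => x + 5) else ffCopy
      let f2 := if lens = 2 then f1.map (fun x => x + 4) else f1
      let f3 := if lens = 3 then f2.map (fun x => x + 3) else f2
      let f4 := if lens = 4 then f3.map (fun x => x + 2) else f3
      let f5 := if lens = 5 then f4.map (fun x => x + 1) else f4
      f5)
    []

-- ===== PORT B =====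
def paixu_alt (train_labels : List Int) : List Int :=
  let n : Int := PySem.List.len train_labels
  let off : Int := if n ≤ 5 then 6 - n else 0
  -- outer 'for i, v in enumerate(...)' appending r + off; inner counting loop
  (PySem.List.enumerate train_labels).foldl
    (fun out iv =>
      let r : Int := (PySem.List.enumerate train_labels).foldl
        (fun r jw => if jw.2 < iv.2 ∨ (jw.2 = iv.2 ∧ jw.1 < iv.1) then r + 1 else r)
        0
      out ++ [r + off])
    []

-- ===== PRECONDITION & SPEC =====
-- Pre_ excludes exactly the empty list, on which A raises ValueError (range() step 0).
def Pre_paixu (train_labels : List Int) : Prop := train_labels ≠ []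
instance (train_labels : List Int) : Decidable (Pre_paixu train_labels) := by
  unfold Pre_paixu; infer_instance
def pvWitness_paixu : List Int := [3, 1, 2]

def Spec_paixu (train_labels : List Int) (out : List Int) : Prop := out = paixu_alt train_labels
instance (train_labels : List Int) (out : List Int) : Decidable (Spec_paixu train_labels out) := by
  unfold Spec_paixu; infer_instance

-- ===== CLAIM (what is proved, stated in full; the proofs are below) =====
def Claim_equal_paixu : Prop := ∀ (train_labels : List Int), Dom_paixu train_labels →
  Pre_paixu train_labels → Spec_paixu train_labels (paixu train_labels)
-- ===== LEMMAS AND PROOFS =====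

-- range(0, n, n) for 0 < n is [0]
lemma pv_pyRange_step_self (n : Int) (h : 0 < n) : PySem.List.pyRange 0 n n = [0] := by
  rw [PySem.List.pyRange_of_pos 0 n h]
  have h1 : (n - 0 + n - 1) / n = 1 := by
    have e : n - 0 + n - 1 = (n - 1) + 1 * n := by ring
    rw [e, Int.add_mul_ediv_right _ _ (by omega : n ≠ 0),
      Int.ediv_eq_zero_of_lt (by omega) (by omega)]
    omega
  rw [if_pos h, h1]
  simp

-- range(1, n+1) is [k+1 for k in range(n)]
lemma pv_pyRange_one (n : Nat) :
    PySem.List.pyRange 1 ((n : Int) + 1) = (List.range n).map (fun k : Nat => ((k : Int) + 1)) := by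
  rw [PySem.List.pyRange_of_pos 1 ((n:Int)+1) (by omega : (0:Int) < 1)]
  by_cases h : 0 < n
  · have hb : ((1:Int) < (n:Int) + 1) := by exact_mod_cast by omega
    rw [if_pos hb]
    have e : ((n : Int) + 1 - 1 + 1 - 1) / 1 = (n : Int) := by simp
    rw [e, Int.toNat_natCast]
    exact List.map_congr_left (fun k _ => by ring)
  · have hn : n = 0 := by omega
    subst hn; simp

-- enumerate(l, s) as a map over range
lemma pv_enumerate_eq (l : List Int) (s : Int) :
    PySem.List.enumerate l s =
      (List.range l.length).map (fun k : Nat => (s + (k : Int), l.getD k 0)) := by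
  induction l generalizing s with
  | nil => simp [PySem.List.enumerate]
  | cons x t ih =>
      simp only [PySem.List.enumerate, ih, List.length_cons, List.range_succ_eq_map,
        List.map_cons, List.map_map]
      refine List.cons_eq_cons.mpr ⟨by simp, ?_⟩
      exact List.map_congr_left (fun k _ => by
        refine Prod.ext ?_ ?_
        · show s + 1 + (k : Int) = s + ((k.succ : Nat) : Int)
          omega
        · rfl)

-- python tuple sort = sort by lexicographic key
lemma pv_sorted2_eq_lex {α : Type} (xs : List α) (f g : α → Int) :
    PySem.List.sorted2 xs f g =
      PySem.List.sorted xs (fun x => toLex (f x, g x)) := by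
  show List.foldl _ [] xs = List.foldl _ [] xs
  congr 1
  funext acc x
  congr 1
  funext a b
  show (decide (f a < f b) || (!decide (f b < f a) && decide (g a < g b)))
      = decide (toLex (f a, g a) < toLex (f b, g b))
  rcases lt_trichotomy (f a) (f b) with h | h | h
  · simp [Prod.Lex.toLex_lt_toLex, h, not_lt.mpr (le_of_lt h)]
  · simp [Prod.Lex.toLex_lt_toLex, h]
  · simp [Prod.Lex.toLex_lt_toLex, not_lt.mpr (le_of_lt h), h, ne_of_gt h]

-- in a strictly key-increasing list, the number of elements below position p is p
lemma pv_countP_pairwise {α κ : Type} [LinearOrder κ] (key : α → κ) :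
    ∀ (ys : List α), ys.Pairwise (fun a b => key a < key b) →
      ∀ (p : Nat) (hp : p < ys.length),
        ys.countP (fun y => decide (key y < key ys[p])) = p := by
  intro ys
  induction ys with
  | nil => intro _ p hp; simp at hp
  | cons y t ih =>
      intro hpw p hp
      rcases List.pairwise_cons.mp hpw with ⟨hy, ht⟩
      cases p with
      | zero =>
          simp only [List.getElem_cons_zero]
          rw [List.countP_cons]
          simp only [lt_irrefl, decide_false]
          rw [List.countP_eq_zero.mpr (fun z hz => by
            simpa using not_lt.mpr (le_of_lt (hy z hz)))]
          simp
      | succ p =>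
          have hp' : p < t.length := by simpa using hp
          simp only [List.getElem_cons_succ]
          rw [List.countP_cons]
          have : key y < key t[p] := hy _ (List.getElem_mem hp')
          simp only [this, decide_true, if_true]
          exact congrArg (· + 1) (ih ht p hp')

-- a counting fold is a countP
lemma pv_foldl_count {α : Type} (p : α → Prop) [DecidablePred p] :
    ∀ (xs : List α) (c : Int),
      xs.foldl (fun r x => if p x then r + 1 else r) c
        = c + ((xs.countP (fun x => decide (p x)) : Nat) : Int) := by
  intro xs
  induction xs with
  | nil => simp
  | cons a t ih =>
      intro c
      rw [List.foldl_cons, List.countP_cons]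
      by_cases h : p a <;> simp only [h, if_true, if_false, decide_true, decide_false, ih] <;>
        push_cast <;> ring

-- an appending fold is a map
lemma pv_foldl_append_map {α β : Type} (f : α → β) :
    ∀ (xs : List α) (acc : List β),
      xs.foldl (fun out x => out ++ [f x]) acc = acc ++ xs.map f := by
  intro xs
  induction xs with
  | nil => simp
  | cons a t ih => intro acc; simp [ih]

-- ===== proof-only definitions =====

-- rank of element k: number of elements smaller, ties broken by original position
def pvCnt (l : List Int) (k : Nat) : Nat :=
  (List.range l.length).countP
    (fun j => decide (l.getD j 0 < l.getD k 0 ∨ (l.getD j 0 = l.getD k 0 ∧ j < k)))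

-- the cc list of port A (sorted (value, 1-based index) pairs)
def pvCC (l : List Int) : List (Int × Int) :=
  PySem.List.sorted ((List.range l.length).map (fun k : Nat => (l.getD k 0, (k : Int) + 1)))
    (fun p => toLex (p.1, p.2))

lemma pv_cnt_eq_countP (l : List Int) (k : Nat) :
    pvCnt l k = (pvCC l).countP
      (fun y => decide (toLex y < toLex (l.getD k 0, (k : Int) + 1))) := by
  rw [pvCC, (PySem.List.sorted_perm _ _ _).countP_eq, List.countP_map, pvCnt]
  apply List.countP_congr
  intro j _
  simp only [Function.comp_def, Prod.Lex.toLex_lt_toLex, decide_eq_true_eq]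
  omega

lemma pv_cc_pairwise (l : List Int) :
    (pvCC l).Pairwise (fun a b => toLex a < toLex b) := by
  have hnd : (pvCC l).Nodup := by
    refine ((PySem.List.sorted_perm _ _ _).nodup_iff).mpr ?_
    exact List.Nodup.map_on
      (fun x _ y _ h => by
        have := congrArg Prod.snd h
        simp only at this
        omega)
      (List.nodup_range)
  have hle : (pvCC l).Pairwise (fun a b => toLex a ≤ toLex b) :=
    PySem.List.sorted_pairwise _ _
  exact (List.pairwise_and_iff.mpr ⟨hle, hnd⟩).imp
    (fun ⟨h1, h2⟩ => lt_of_le_of_ne h1 (fun he => h2 (by simpa using he)))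

lemma pv_cc_at_cnt (l : List Int) (k : Nat) (hk : k < l.length) :
    pvCnt l k < l.length ∧ (pvCC l).getD (pvCnt l k) (0, 0) = (l.getD k 0, (k : Int) + 1) := by
  have hlen : (pvCC l).length = l.length := by
    rw [pvCC, (PySem.List.sorted_perm _ _ _).length_eq, List.length_map, List.length_range]
  have hmem : (l.getD k 0, (k : Int) + 1) ∈ pvCC l := by
    rw [pvCC, PySem.List.mem_sorted]
    exact List.mem_map.mpr ⟨k, List.mem_range.mpr hk, rfl⟩
  obtain ⟨p, hp, hpe⟩ := List.mem_iff_getElem.mp hmem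
  have hcnt : pvCnt l k = p := by
    rw [pv_cnt_eq_countP, ← hpe]
    exact pv_countP_pairwise (fun a => toLex a) (pvCC l) (pv_cc_pairwise l) p hp
  constructor
  · omega
  · rw [hcnt, List.getD_eq_getElem _ _ (by omega), hpe]

lemma pv_cnt_inj (l : List Int) (k1 k2 : Nat) (h1 : k1 < l.length) (h2 : k2 < l.length)
    (h : pvCnt l k1 = pvCnt l k2) : k1 = k2 := by
  have e1 := (pv_cc_at_cnt l k1 h1).2
  have e2 := (pv_cc_at_cnt l k2 h2).2
  rw [h, e2] at e1
  have := congrArg Prod.snd e1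
  simp only at this
  omega

-- the sorted dd of port A is the list of (value, rank+1, index+1) triples in index order
lemma pv_ee (l : List Int) :
    PySem.List.sorted
      ((List.range l.length).map (fun p : Nat =>
        (((pvCC l).getD p (0, 0)).1, (p : Int) + 1, ((pvCC l).getD p (0, 0)).2)))
      (fun x => x.2.2)
    = (List.range l.length).map
        (fun k : Nat => (l.getD k 0, ((pvCnt l k : Nat) : Int) + 1, (k : Int) + 1)) := by
  apply PySem.List.sorted_eq_of_perm_of_pairwise_lt
  · -- the triple list in index order is a permutation of dd
    have hE : (List.range l.length).map
        (fun k : Nat => (l.getD k 0, ((pvCnt l k : Nat) : Int) + 1, (k : Int) + 1))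
        = ((List.range l.length).map (fun k => pvCnt l k)).map
            (fun p : Nat =>
              (((pvCC l).getD p (0, 0)).1, (p : Int) + 1, ((pvCC l).getD p (0, 0)).2)) := by
      rw [List.map_map]
      refine List.map_congr_left (fun k hk => ?_)
      have hk' := List.mem_range.mp hk
      have := (pv_cc_at_cnt l k hk').2
      simp only [Function.comp_def, this]
    rw [hE]
    refine List.Perm.map _ ?_
    have hnd : ((List.range l.length).map (fun k => pvCnt l k)).Nodup :=
      List.Nodup.map_on
        (fun x hx y hy h =>
          pv_cnt_inj l x y (List.mem_range.mp hx) (List.mem_range.mp hy) h)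
        List.nodup_range
    have hsub : ((List.range l.length).map (fun k => pvCnt l k)) ⊆ List.range l.length := by
      intro a ha
      obtain ⟨k, hk, rfl⟩ := List.mem_map.mp ha
      exact List.mem_range.mpr (pv_cc_at_cnt l k (List.mem_range.mp hk)).1
    exact (List.subperm_of_subset hnd hsub).perm_of_length_le (by simp)
  · -- third components k+1 strictly increase with k
    refine List.pairwise_map.mpr (List.pairwise_lt_range.imp ?_)
    intro a b h
    simp only
    omega

-- port B computes pvCnt + offset at every position
lemma pv_alt_eq (l : List Int) :
    paixu_alt l = (List.range l.length).map (fun k : Nat =>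
      ((pvCnt l k : Nat) : Int) +
        (if (l.length : Int) ≤ 5 then 6 - (l.length : Int) else 0)) := by
  simp only [paixu_alt, PySem.List.len]
  rw [pv_foldl_append_map
    (fun iv : Int × Int =>
      ((PySem.List.enumerate l).foldl
        (fun r jw => if jw.2 < iv.2 ∨ (jw.2 = iv.2 ∧ jw.1 < iv.1) then r + 1 else r)
        (0 : Int)) + (if (l.length : Int) ≤ 5 then 6 - (l.length : Int) else 0))]
  rw [List.nil_append, pv_enumerate_eq, List.map_map]
  refine List.map_congr_left (fun k hk => ?_)
  simp only [Function.comp_def]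
  rw [pv_foldl_count (fun jw : Int × Int =>
    jw.2 < l.getD k 0 ∨ (jw.2 = l.getD k 0 ∧ jw.1 < 0 + (k : Int)))]
  rw [List.countP_map, zero_add, pvCnt]
  congr 2
  apply List.countP_congr
  intro j _
  simp only [Function.comp_def, decide_eq_true_eq]
  omega

-- ===== main equivalence =====
theorem paixu_spec : Claim_equal_paixu := by
  intro l _ hpre
  show paixu l = paixu_alt l
  have hn : 0 < l.length := List.length_pos_iff.mpr hpre
  rw [pv_alt_eq]
  -- evaluate port A
  simp only [paixu, PySem.List.len]
  rw [pv_pyRange_step_self _ (by exact_mod_cast hn)]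
  simp only [List.foldl_cons, List.foldl_nil]
  rw [show PySem.List.slice l (some 0) (some (0 + (l.length : Int))) = l from by
    simp [PySem.List.slice]]
  simp only [pv_pyRange_one, pv_sorted2_eq_lex, List.map_map]
  simp only [Function.comp_def, add_sub_cancel_right, PySem.List.pyGetD_natCast]
  rw [show (fun x : Nat =>
      (((PySem.List.sorted ((List.range l.length).map fun x => (l.getD x 0, (x : Int) + 1))
            (fun p => toLex (p.1, p.2))).getD x (0, 0)).1,
        (x : Int) + 1,
        ((PySem.List.sorted ((List.range l.length).map fun x => (l.getD x 0, (x : Int) + 1))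
            (fun p => toLex (p.1, p.2))).getD x (0, 0)).2))
      = (fun p : Nat => (((pvCC l).getD p (0, 0)).1, (p : Int) + 1, ((pvCC l).getD p (0, 0)).2))
    from by rw [pvCC]]
  rw [pv_ee]
  simp only [List.map_map]
  -- the five if-branches: offset 6 - n for n in 1..5, none otherwise
  rcases (by omega : l.length = 1 ∨ l.length = 2 ∨ l.length = 3 ∨ l.length = 4 ∨
      l.length = 5 ∨ 6 ≤ l.length) with h | h | h | h | h | h
  -- n = 1 .. 5: norm_num evaluates the chain on the singleton range and fixed offset
  case _ => rw [h]; norm_num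
  case _ => rw [h]; norm_num
  case _ => rw [h]; norm_num
  case _ => rw [h]; norm_num
  case _ => rw [h]; norm_num
  -- n >= 6: every branch condition is false and the offset is 0
  case _ =>
    have c1 : ((l.length : Int) = 1) = False := eq_false (by omega)
    have c2 : ((l.length : Int) = 2) = False := eq_false (by omega)
    have c3 : ((l.length : Int) = 3) = False := eq_false (by omega)
    have c4 : ((l.length : Int) = 4) = False := eq_false (by omega)
    have c5 : ((l.length : Int) = 5) = False := eq_false (by omega)
    have c6 : ((l.length : Int) ≤ 5) = False := eq_false (by omega)
    simp only [c1, c2, c3, c4, c5, c6, if_false]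
    exact List.map_congr_left (fun k _ => by simp)
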